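-- pv_equiv track=rewrite | github.com/Gamb1no0/omd | countvectorizer.py | make_feature_names
-- ===== SOURCE A (Python) =====
-- from typing import List
--
-- def make_feature_names(corpus: List[str]) -> List[str]:
--     '''Создает вектор для атрибута __feature_names.
--
--     Метод получает блок текстов corpus и собирает их в вектор
--     уникальных слов, приведенныхз в нижний регистр.'''
--
--     set_words = set()
--     feature_names = []
--
--     if not isinstance(corpus, list):
--         raise TypeError('List corpus expected.')
--     for text in corpus:
--         if not isinstance(text, str):
--             raise TypeError(f'String object expected but get {type(text)}')
--         for word in map(lambda x: x.lower(), text.split()):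
--             if word not in set_words:
--                 set_words.add(word)
--                 feature_names.append(word)
--     return feature_names
-- ===== SOURCE B (Python) =====
-- from typing import List
--
-- def make_feature_names(corpus: List[str]) -> List[str]:
--     if not isinstance(corpus, list):
--         raise TypeError('List corpus expected.')
--     for text in corpus:
--         if not isinstance(text, str):
--             raise TypeError(f'String object expected but get {type(text)}')
--     words = [w.lower() for text in corpus for w in text.split()]
--     feature_names = []
--     while words:
--         head = words[0]
--         feature_names.append(head)
--         words = [w for w in words[1:] if w != head]
--     return feature_names
-- ===== Notes on version B (the rewrite author's own statement) =====
-- stated objective: alternative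
-- what changed: B uses no set or dict at all: it flattens all lowercased words into one list, then selects unique words by a repeated-filter loop (take the head, filter all its later occurrences out of the rest).
import Mathlib
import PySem

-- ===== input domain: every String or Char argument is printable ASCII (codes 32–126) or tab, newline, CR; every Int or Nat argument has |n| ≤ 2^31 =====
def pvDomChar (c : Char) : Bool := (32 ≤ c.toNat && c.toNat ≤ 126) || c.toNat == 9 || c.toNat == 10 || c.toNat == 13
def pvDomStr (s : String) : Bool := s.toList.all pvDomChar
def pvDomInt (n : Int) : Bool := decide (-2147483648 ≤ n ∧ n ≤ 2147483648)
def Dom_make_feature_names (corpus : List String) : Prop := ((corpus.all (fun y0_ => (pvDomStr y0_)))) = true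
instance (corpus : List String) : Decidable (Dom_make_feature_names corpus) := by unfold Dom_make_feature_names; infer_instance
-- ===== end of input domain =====

-- B drops A's seen-set entirely: it flattens all lowercased words and picks unique words by a
-- repeated-filter selection loop (alternative decomposition, not faster).

-- ===== PORT A =====
-- literal port of A: one pass keeping a seen-set and the output list in one state
def make_feature_names (corpus : List String) : List String :=
  (corpus.foldl
    (fun (st : PySem.Set String × List String) text =>
      ((PySem.Str.split₀ text).map PySem.Str.lower).foldl
        (fun st word =>
          if PySem.Set.contains st.1 word then st
          else (PySem.Set.add st.1 word, st.2 ++ [word]))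
        st)
    (PySem.Set.empty, [])).2

-- ===== PORT B =====
-- Source B's while loop: take the head word, drop all its other occurrences, repeat
def uniqLoop (feature_names : List String) (words : List String) : List String :=
  match words with
  | [] => feature_names
  | head :: rest => uniqLoop (feature_names ++ [head]) (rest.filter (fun w => w ≠ head))
termination_by words.length
decreasing_by
  simp only [List.length_unattach]
  exact Nat.lt_succ_of_le (le_trans (List.length_filter_le _ _) (by simp))

-- port of Source B: flat comprehension of lowercased words, then the repeated-filter loop
def make_feature_names_alt (corpus : List String) : List String :=
  uniqLoop [] (corpus.flatMap (fun text => (PySem.Str.split₀ text).map PySem.Str.lower))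

-- ===== PRECONDITION & SPEC =====
def Spec_make_feature_names (corpus : List String) (out : List String) : Prop := out = make_feature_names_alt corpus
instance (corpus : List String) (out : List String) : Decidable (Spec_make_feature_names corpus out) := by unfold Spec_make_feature_names; infer_instance

-- ===== CLAIM (what is proved, stated in full; the proofs are below) =====
def Claim_equal_make_feature_names : Prop := ∀ (corpus : List String), Dom_make_feature_names corpus → Spec_make_feature_names corpus (make_feature_names corpus)

-- ===== LEMMAS AND PROOFS =====

-- A's inner word loop, started in a state whose set equals its list, is Set.add folded over the words
lemma inner_eq (ws : List String) : ∀ (s : PySem.Set String),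
    ws.foldl
      (fun (st : PySem.Set String × List String) word =>
        if PySem.Set.contains st.1 word then st
        else (PySem.Set.add st.1 word, st.2 ++ [word]))
      (s, s)
    = (ws.foldl PySem.Set.add s, ws.foldl PySem.Set.add s) := by
  induction ws with
  | nil => intro s; rfl
  | cons w ws ih =>
    intro s
    simp only [List.foldl_cons]
    by_cases h : PySem.Set.contains s w = true
    · simp only [h, if_true, PySem.Set.add]
      exact ih s
    · simp only [h, PySem.Set.add]
      exact ih (s ++ [w])

-- A's outer loop equals folding Set.add over each text's words
lemma outer_eq (corpus : List String) : ∀ (s : PySem.Set String),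
    corpus.foldl
      (fun (st : PySem.Set String × List String) text =>
        ((PySem.Str.split₀ text).map PySem.Str.lower).foldl
          (fun st word =>
            if PySem.Set.contains st.1 word then st
            else (PySem.Set.add st.1 word, st.2 ++ [word]))
          st)
      (s, s)
    = (corpus.foldl (fun s t => ((PySem.Str.split₀ t).map PySem.Str.lower).foldl PySem.Set.add s) s,
       corpus.foldl (fun s t => ((PySem.Str.split₀ t).map PySem.Str.lower).foldl PySem.Set.add s) s) := by
  induction corpus with
  | nil => intro s; rfl
  | cons t ts ih =>
    intro s
    simp only [List.foldl_cons, inner_eq]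
    exact ih _

-- folding Set.add over the flat word list equals A's nested fold
lemma flat_fold_eq (corpus : List String) : ∀ (s : PySem.Set String),
    (corpus.flatMap (fun text => (PySem.Str.split₀ text).map PySem.Str.lower)).foldl PySem.Set.add s
    = corpus.foldl (fun s t => ((PySem.Str.split₀ t).map PySem.Str.lower).foldl PySem.Set.add s) s := by
  induction corpus with
  | nil => intro s; rfl
  | cons t ts ih =>
    intro s
    simp only [List.flatMap_cons, List.foldl_append, ih]
    rfl

-- adding an element already in the set is a no-op, so filtering it out of the tail changes nothing
lemma foldl_add_filter (h : String) : ∀ (t : List String) (s : PySem.Set String), h ∈ s →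
    t.foldl PySem.Set.add s = (t.filter (fun w => w ≠ h)).foldl PySem.Set.add s := by
  intro t
  induction t with
  | nil => intro s _; rfl
  | cons a t ih =>
    intro s hs
    by_cases ha : a = h
    · subst ha
      have h1 : PySem.Set.add s a = s := by
        simp [PySem.Set.add, PySem.Set.contains, hs]
      have h2 : List.filter (fun w => decide (w ≠ a)) (a :: t)
          = List.filter (fun w => decide (w ≠ a)) t := by simp
      rw [List.foldl_cons, h1, h2]
      exact ih s hs
    · have h2 : List.filter (fun w => decide (w ≠ h)) (a :: t)
          = a :: List.filter (fun w => decide (w ≠ h)) t := by simp [ha]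
      rw [List.foldl_cons, h2, List.foldl_cons]
      have : h ∈ PySem.Set.add s a := by
        unfold PySem.Set.add
        split <;> simp [hs]
      exact ih (PySem.Set.add s a) this

-- elements all different from h fold through a leading h unchanged
lemma foldl_add_cons (h : String) : ∀ (t : List String) (s : PySem.Set String),
    (∀ u ∈ t, u ≠ h) →
    t.foldl PySem.Set.add (h :: s) = h :: t.foldl PySem.Set.add s := by
  intro t
  induction t with
  | nil => intro s _; rfl
  | cons a t ih =>
    intro s hne
    have ha : a ≠ h := hne a (by simp)
    have hcontains : PySem.Set.contains (h :: s) a = PySem.Set.contains s a := by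
      simp [PySem.Set.contains, ha]
    have hadd : PySem.Set.add (h :: s) a = h :: PySem.Set.add s a := by
      unfold PySem.Set.add
      rw [hcontains]
      split <;> simp
    simp only [List.foldl_cons, hadd]
    exact ih (PySem.Set.add s a) (fun u hu => hne u (by simp [hu]))

-- the repeated-filter loop computes first-occurrence dedup (= Set.ofList)
lemma uniqLoop_eq_ofList_len : ∀ (n : Nat) (ws : List String), ws.length ≤ n → ∀ (acc : List String),
    uniqLoop acc ws = acc ++ PySem.Set.ofList ws := by
  intro n
  induction n with
  | zero =>
    intro ws hws acc
    have : ws = [] := List.eq_nil_of_length_eq_zero (Nat.le_zero.mp hws)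
    subst this
    simp [uniqLoop, PySem.Set.ofList]
  | succ n ih =>
    intro ws hws acc
    match ws with
    | [] => simp [uniqLoop, PySem.Set.ofList]
    | h :: t =>
      rw [uniqLoop]
      have hlen : (t.filter (fun w => w ≠ h)).length ≤ n :=
        le_trans (List.length_filter_le _ _) (Nat.lt_succ_iff.mp (by simpa using hws))
      rw [ih _ hlen (acc ++ [h])]
      have h1 : PySem.Set.ofList (h :: t)
          = h :: PySem.Set.ofList (t.filter (fun w => w ≠ h)) := by
        show t.foldl PySem.Set.add (PySem.Set.add [] h) = _
        have hsing : PySem.Set.add ([] : PySem.Set String) h = [h] := rfl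
        rw [hsing]
        rw [foldl_add_filter h t [h] (by simp)]
        have hc : ([h] : List String) = h :: [] := rfl
        rw [hc, foldl_add_cons h _ []
          (fun u hu => by simpa using (List.of_mem_filter hu))]
        rfl
      rw [h1]
      simp

lemma uniqLoop_eq_ofList (ws acc : List String) :
    uniqLoop acc ws = acc ++ PySem.Set.ofList ws :=
  uniqLoop_eq_ofList_len ws.length ws le_rfl acc

-- ===== VERDICT (by name: the statement is the Claim_ definition above) =====
theorem make_feature_names_spec : Claim_equal_make_feature_names := by
  intro corpus _
  unfold Spec_make_feature_names make_feature_names make_feature_names_alt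
  rw [uniqLoop_eq_ofList, PySem.Set.ofList_eq_foldl, flat_fold_eq]
  show (corpus.foldl _ ((PySem.Set.empty : PySem.Set String), ([] : List String))).2 = _
  rw [show ((PySem.Set.empty : PySem.Set String), ([] : List String))
        = (([] : PySem.Set String), ([] : PySem.Set String)) from rfl,
      outer_eq]
  rfl
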